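-- pv_equiv track=rewrite | github.com/arnolicious/Musicseerr | backend/services/search_service.py | _tokens_match
-- ===== SOURCE A (Python) =====
-- def _tokens_match(query_tokens: set[str], title_tokens: set[str]) -> bool:
--     """Check token overlap allowing prefix matching for partial queries."""
--     min_prefix = 2
--     if all(
--         any(qt == tt or (len(qt) >= min_prefix and tt.startswith(qt)) for tt in title_tokens)
--         for qt in query_tokens
--     ):
--         return True
--     if all(
--         any(tt == qt or (len(tt) >= min_prefix and qt.startswith(tt)) for qt in query_tokens)
--         for tt in title_tokens
--     ):
--         return True
--     return False
-- ===== SOURCE B (Python) =====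
-- def _tokens_match(query_tokens: set[str], title_tokens: set[str]) -> bool:
--     """Check token overlap allowing prefix matching for partial queries.
--
--     Alternative strategy: instead of scanning the other token set for every
--     token, build a hash index once (the exact tokens plus all their prefixes
--     of length >= 2); each token is then matched by two set lookups.
--     """
--     def index(tokens):
--         exact = set(tokens)
--         pre = set()
--         for t in tokens:
--             for k in range(2, len(t) + 1):
--                 pre.add(t[:k])
--         return exact, pre
--
--     texact, tpre = index(title_tokens)
--     if all(qt in texact or qt in tpre for qt in query_tokens):
--         return True
--     qexact, qpre = index(query_tokens)
--     return all(tt in qexact or tt in qpre for tt in title_tokens)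
-- ===== Notes on version B (the rewrite author's own statement) =====
-- stated objective: alternative
-- what changed: Replaces A's per-token scan of the opposite token set (nested all/any loops with startswith) by a hash index built once - the set of exact tokens plus the set of all token prefixes of length >= 2 - so each token is matched by two set lookups; the inner scan disappears.
import Mathlib
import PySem

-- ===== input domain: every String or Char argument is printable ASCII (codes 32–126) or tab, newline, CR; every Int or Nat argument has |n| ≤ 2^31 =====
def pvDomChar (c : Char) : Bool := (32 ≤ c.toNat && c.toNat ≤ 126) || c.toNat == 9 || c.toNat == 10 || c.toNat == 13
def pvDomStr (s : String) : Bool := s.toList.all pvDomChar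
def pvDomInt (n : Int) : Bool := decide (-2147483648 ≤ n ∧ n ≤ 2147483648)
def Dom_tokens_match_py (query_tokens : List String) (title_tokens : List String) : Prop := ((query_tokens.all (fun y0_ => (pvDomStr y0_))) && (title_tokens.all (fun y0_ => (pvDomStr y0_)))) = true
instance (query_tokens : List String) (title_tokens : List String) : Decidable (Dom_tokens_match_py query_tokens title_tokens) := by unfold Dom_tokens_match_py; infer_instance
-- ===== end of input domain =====

-- B replaces A's per-token scan of the other token set by a hash index built once
-- (exact tokens + all prefixes of length >= 2), two set lookups per token; objective: alternative.


-- ===== PORT A =====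
-- Literal transliteration of A: two all/any nested scans, branches in source order.
def tokens_match_py (query_tokens : List String) (title_tokens : List String) : Bool :=
  let min_prefix : Int := 2
  if query_tokens.all (fun qt =>
      title_tokens.any (fun tt =>
        qt == tt || (decide (PySem.Str.len qt ≥ min_prefix) && PySem.Str.startswith tt qt))) then
    true
  else if title_tokens.all (fun tt =>
      query_tokens.any (fun qt =>
        tt == qt || (decide (PySem.Str.len tt ≥ min_prefix) && PySem.Str.startswith qt tt))) then
    true
  else
    false

-- ===== PORT B =====
-- index(tokens): the exact-token set and the set of all prefixes t[:k], 2 <= k <= len(t).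
def pvIndexPre (tokens : List String) : PySem.Set String :=
  tokens.foldl (fun pre t =>
    (PySem.List.pyRange 2 (PySem.Str.len t + 1) 1).foldl
      (fun pre k => PySem.Set.add pre (PySem.Str.slice t none (some k))) pre)
    PySem.Set.empty

def tokens_match_py_alt (query_tokens : List String) (title_tokens : List String) : Bool :=
  let texact := PySem.Set.ofList title_tokens
  let tpre := pvIndexPre title_tokens
  if query_tokens.all (fun qt => PySem.Set.contains texact qt || PySem.Set.contains tpre qt) then
    true
  else
    let qexact := PySem.Set.ofList query_tokens
    let qpre := pvIndexPre query_tokens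
    title_tokens.all (fun tt => PySem.Set.contains qexact tt || PySem.Set.contains qpre tt)

-- ===== PRECONDITION & SPEC =====
def Spec_tokens_match_py (query_tokens : List String) (title_tokens : List String) (out : Bool) : Prop := out = tokens_match_py_alt query_tokens title_tokens
instance (query_tokens : List String) (title_tokens : List String) (out : Bool) : Decidable (Spec_tokens_match_py query_tokens title_tokens out) := by unfold Spec_tokens_match_py; infer_instance

-- ===== CLAIM (what is proved, stated in full; the proofs are below) =====
def Claim_equal_tokens_match_py : Prop := ∀ (query_tokens : List String) (title_tokens : List String), Dom_tokens_match_py query_tokens title_tokens → Spec_tokens_match_py query_tokens title_tokens (tokens_match_py query_tokens title_tokens)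

-- ===== LEMMAS AND PROOFS =====

-- The inner prefix loop of pvIndexPre: what one token t contributes.
lemma mem_prefix_fold (t qt : String) (acc : PySem.Set String) :
    qt ∈ (PySem.List.pyRange 2 (PySem.Str.len t + 1) 1).foldl
      (fun pre k => PySem.Set.add pre (PySem.Str.slice t none (some k))) acc ↔
    qt ∈ acc ∨ (2 ≤ qt.toList.length ∧ qt.toList <+: t.toList) := by
  have hgen : ∀ (l : List Int) (acc : PySem.Set String),
      qt ∈ l.foldl (fun pre k => PySem.Set.add pre (PySem.Str.slice t none (some k))) acc ↔
      qt ∈ acc ∨ ∃ k ∈ l, qt = PySem.Str.slice t none (some k) := by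
    intro l
    induction l with
    | nil => simp
    | cons k l ih =>
      intro acc
      simp [ih, PySem.Set.mem_add]
      tauto
  rw [hgen]
  constructor
  · rintro (h | ⟨k, hk, hq⟩)
    · exact Or.inl h
    · rw [PySem.List.mem_pyRange_one] at hk
      obtain ⟨hk2, hklt⟩ := hk
      right
      have h0 : (0:Int) ≤ k := by omega
      have hslice : (PySem.Str.slice t none (some k)).toList = t.toList.take k.toNat := by
        simp [pysem, PySem.List.slice_to _ h0]
      have hql : qt.toList = t.toList.take k.toNat := by rw [hq, hslice]
      have hlen : k.toNat ≤ t.toList.length := by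
        have := PySem.Str.len_eq t; omega
      constructor
      · rw [hql, List.length_take]; omega
      · rw [hql]; exact List.take_prefix _ _
  · rintro (h | ⟨h2, hpre⟩)
    · exact Or.inl h
    · right
      refine ⟨(qt.toList.length : Int), ?_, ?_⟩
      · rw [PySem.List.mem_pyRange_one]
        have hle : qt.toList.length ≤ t.toList.length := hpre.length_le
        have := PySem.Str.len_eq t
        omega
      · have hslice : (PySem.Str.slice t none (some (qt.toList.length : Int))).toList
            = t.toList.take qt.toList.length := by
          simp [pysem, PySem.List.slice_to]
        apply String.ext
        rw [hslice]
        exact (List.prefix_iff_eq_take.mp hpre)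

lemma mem_pvIndexPre (tokens : List String) (qt : String) :
    qt ∈ pvIndexPre tokens ↔ ∃ t ∈ tokens, 2 ≤ qt.toList.length ∧ qt.toList <+: t.toList := by
  unfold pvIndexPre
  have hgen : ∀ (l : List String) (acc : PySem.Set String),
      qt ∈ l.foldl (fun pre t =>
        (PySem.List.pyRange 2 (PySem.Str.len t + 1) 1).foldl
          (fun pre k => PySem.Set.add pre (PySem.Str.slice t none (some k))) pre) acc ↔
      qt ∈ acc ∨ ∃ t ∈ l, 2 ≤ qt.toList.length ∧ qt.toList <+: t.toList := by
    intro l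
    induction l with
    | nil => simp
    | cons t l ih =>
      intro acc
      simp only [List.foldl_cons, ih, mem_prefix_fold, List.mem_cons]
      constructor
      · rintro ((h | h) | ⟨u, hu, hq⟩)
        · exact Or.inl h
        · exact Or.inr ⟨t, Or.inl rfl, h⟩
        · exact Or.inr ⟨u, Or.inr hu, hq⟩
      · rintro (h | ⟨u, (rfl | hu), hq⟩)
        · exact Or.inl (Or.inl h)
        · exact Or.inl (Or.inr hq)
        · exact Or.inr ⟨u, hu, hq⟩
  rw [hgen]
  simp [PySem.Set.empty]

-- Per-token: B's two hash lookups equal A's scan of the other token list.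
lemma lookup_eq_scan (tokens : List String) (qt : String) :
    (PySem.Set.contains (PySem.Set.ofList tokens) qt || PySem.Set.contains (pvIndexPre tokens) qt)
    = tokens.any (fun tt =>
        qt == tt || (decide (PySem.Str.len qt ≥ 2) && PySem.Str.startswith tt qt)) := by
  rw [Bool.eq_iff_iff]
  simp only [Bool.or_eq_true, PySem.Set.contains_iff, PySem.Set.mem_ofList, mem_pvIndexPre,
    List.any_eq_true, Bool.and_eq_true, decide_eq_true_eq, beq_iff_eq,
    PySem.Str.startswith_eq, PySem.Chars.startswith_iff, PySem.Str.len_eq, ge_iff_le]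
  constructor
  · rintro (h | ⟨t, ht, h2, hp⟩)
    · exact ⟨qt, h, Or.inl rfl⟩
    · exact ⟨t, ht, Or.inr ⟨by exact_mod_cast h2, hp⟩⟩
  · rintro ⟨t, ht, (rfl | ⟨h2, hp⟩)⟩
    · exact Or.inl ht
    · exact Or.inr ⟨t, ht, by exact_mod_cast h2, hp⟩

-- ===== VERDICT (by name: the statement is the Claim_ definition above) =====
theorem tokens_match_py_spec : Claim_equal_tokens_match_py := by
  intro query_tokens title_tokens _
  unfold Spec_tokens_match_py tokens_match_py tokens_match_py_alt
  simp only []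
  have h1 : query_tokens.all (fun qt => PySem.Set.contains (PySem.Set.ofList title_tokens) qt
        || PySem.Set.contains (pvIndexPre title_tokens) qt)
      = query_tokens.all (fun qt => title_tokens.any (fun tt =>
          qt == tt || (decide (PySem.Str.len qt ≥ 2) && PySem.Str.startswith tt qt))) := by
    congr 1; funext qt; exact lookup_eq_scan title_tokens qt
  have h2 : title_tokens.all (fun tt => PySem.Set.contains (PySem.Set.ofList query_tokens) tt
        || PySem.Set.contains (pvIndexPre query_tokens) tt)
      = title_tokens.all (fun tt => query_tokens.any (fun qt =>
          tt == qt || (decide (PySem.Str.len tt ≥ 2) && PySem.Str.startswith qt tt))) := by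
    congr 1; funext tt; exact lookup_eq_scan query_tokens tt
  rw [h1, h2]
  split_ifs with hq ht
  · rfl
  · exact ht.symm
  · simp only [Bool.not_eq_true] at ht
    exact ht.symm
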